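-- pv_equiv track=rewrite | github.com/pypi-data/pypi-mirror-131 | packages/regtag/regtag-0.0.5.tar.gz/regtag-0.0.5/src/regtag/main.py | extract_word_tag
-- ===== SOURCE A (Python) =====
-- def extract_word_tag(txt, txt_tag):
--     phrases = []
--     phrases_tags = []
--
--     current_tag = 'O'
--     phrase = []
--     for char, char_tag in zip(list(txt), txt_tag):
--         if char_tag.split('-')[-1] != current_tag:
--             if len(phrase) > 0:
--                 phrases.append(''.join(phrase))
--                 phrases_tags.append(current_tag)
--             phrase = [char]
--             current_tag = char_tag.split('-')[-1]
--         else: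
--             phrase.append(char)
--     if len(phrase) > 0:
--         phrases.append(''.join(phrase))
--         phrases_tags.append(current_tag)
--
--     words, word_tags = [], []
--     for w, t in zip(phrases, phrases_tags):
--         list_words = w.strip().split()
--         words.extend(list_words)
--         if t == 'O':
--             word_tags.extend(['O'] * len(list_words))
--         else:
--             word_tags.append('B-{}'.format(t))
--             word_tags.extend(['I-{}'.format(t)] * (len(list_words) - 1))
--
--     return words, word_tags
-- ===== SOURCE B (Python) =====
-- def extract_word_tag(txt, txt_tag):
--     # Single fused pass: a two-pointer scan over maximal runs of equal tag-suffix,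
--     # emitting words and BIO tags directly (no intermediate phrases/phrases_tags lists).
--     words, word_tags = [], []
--     pairs = list(zip(txt, txt_tag))
--     n = len(pairs)
--     i = 0
--     while i < n:
--         tag = pairs[i][1].split('-')[-1]
--         j = i + 1
--         while j < n and pairs[j][1].split('-')[-1] == tag:
--             j += 1
--         ws = ''.join(pairs[k][0] for k in range(i, j)).strip().split()
--         words += ws
--         if tag == 'O':
--             word_tags += ['O'] * len(ws)
--         else:
--             word_tags += ['B-' + tag] + ['I-' + tag] * (len(ws) - 1)
--         i = j
--     return words, word_tags
-- ===== Notes on version B (the rewrite author's own statement) =====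
-- stated objective: alternative
-- what changed: Replaces A's two-pass structure (a state-machine building intermediate phrases/phrases_tags lists, then a second loop splitting them into words) with a single fused pass that scans each maximal run of equal tag-suffix with an inner two-pointer scan and emits the words and BIO tags immediately.
import Mathlib
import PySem

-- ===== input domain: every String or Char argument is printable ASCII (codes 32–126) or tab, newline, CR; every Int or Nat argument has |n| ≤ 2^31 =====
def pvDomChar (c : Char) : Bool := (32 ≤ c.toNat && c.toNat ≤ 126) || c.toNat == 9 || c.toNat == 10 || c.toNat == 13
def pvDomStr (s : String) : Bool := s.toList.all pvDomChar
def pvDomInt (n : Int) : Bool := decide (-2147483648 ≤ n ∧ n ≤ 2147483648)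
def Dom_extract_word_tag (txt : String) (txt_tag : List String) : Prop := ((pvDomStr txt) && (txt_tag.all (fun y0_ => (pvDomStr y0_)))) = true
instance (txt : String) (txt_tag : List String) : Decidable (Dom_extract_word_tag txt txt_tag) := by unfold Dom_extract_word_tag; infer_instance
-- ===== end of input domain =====

-- B fuses A's two passes (phrase state machine, then word emission) into one pass over maximal
-- tag-suffix runs; same cost, different decomposition (objective: alternative).


-- ===== PORT A =====
-- char_tag.split('-')[-1]; split('-') with a nonempty separator is `some` and never the empty
-- list, so [-1] is exactly the last element (exact).
def pvTagSuffix (s : String) : String := ((PySem.Str.split? s "-").getD []).getLastD ""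

-- the body of A's first loop, over state ((phrases, phrases_tags), current_tag, phrase)
def pvAStep (st : (List String × List String) × String × List Char) (p : Char × String) :
    (List String × List String) × String × List Char :=
  let ((phrases, ptags), cur, phrase) := st
  let s := pvTagSuffix p.2
  if s ≠ cur then
    let acc := if phrase.length > 0 then (phrases ++ [String.ofList phrase], ptags ++ [cur])
               else (phrases, ptags)
    (acc, s, [p.1])
  else ((phrases, ptags), cur, phrase ++ [p.1])

-- the body of A's second loop, over (words, word_tags)
def pvAEmit (acc : List String × List String) (wt : String × String) : List String × List String :=
  let ws := PySem.Str.split₀ (PySem.Str.strip wt.1)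
  (acc.1 ++ ws,
   if wt.2 = "O" then acc.2 ++ List.replicate ws.length "O"
   else acc.2 ++ ["B-" ++ wt.2] ++ List.replicate (ws.length - 1) ("I-" ++ wt.2))

def extract_word_tag (txt : String) (txt_tag : List String) : List String × List String :=
  let st := (txt.toList.zip txt_tag).foldl pvAStep (([], []), "O", [])
  let (acc, cur, phrase) := st
  let (phrases, ptags) :=
    if phrase.length > 0 then (acc.1 ++ [String.ofList phrase], acc.2 ++ [cur]) else acc
  (phrases.zip ptags).foldl pvAEmit ([], [])

-- ===== PORT B =====
-- Source B's fused two-pointer loop over the suffix pairs[i:]: pairs[i] fixes the run's tag-suffix,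
-- the inner j-loop scans exactly the maximal matching run (pairs[i+1:j] = takeWhile on the tail,
-- pairs[j:] = dropWhile), the run's words and BIO tags are emitted at once, then i = j.
def pvBGo (rest : List (Char × String)) (words tags : List String) : List String × List String :=
  match rest with
  | [] => (words, tags)
  | (c, s) :: rs =>
    let t := pvTagSuffix s
    let g := rs.takeWhile (fun p => pvTagSuffix p.2 == t)
    let r := rs.dropWhile (fun p => pvTagSuffix p.2 == t)
    let ws := PySem.Str.split₀ (PySem.Str.strip (String.ofList (c :: g.map Prod.fst)))
    pvBGo r (words ++ ws)
      (if t = "O" then tags ++ List.replicate ws.length "O"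
       else tags ++ ["B-" ++ t] ++ List.replicate (ws.length - 1) ("I-" ++ t))
termination_by rest.length
decreasing_by
  simp only [List.length_cons]
  exact Nat.lt_succ_of_le (List.length_dropWhile_le _ _)

def extract_word_tag_alt (txt : String) (txt_tag : List String) : List String × List String :=
  pvBGo (txt.toList.zip txt_tag) [] []

-- ===== PRECONDITION & SPEC =====
def Spec_extract_word_tag (txt : String) (txt_tag : List String) (out : List String × List String) : Prop := out = extract_word_tag_alt txt txt_tag
instance (txt : String) (txt_tag : List String) (out : List String × List String) : Decidable (Spec_extract_word_tag txt txt_tag out) := by unfold Spec_extract_word_tag; infer_instance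

-- ===== CLAIM (what is proved, stated in full; the proofs are below) =====
def Claim_equal_extract_word_tag : Prop := ∀ (txt : String) (txt_tag : List String), Dom_extract_word_tag txt txt_tag → Spec_extract_word_tag txt txt_tag (extract_word_tag txt txt_tag)

-- ===== LEMMAS AND PROOFS =====

-- A's flush after its first loop, as a function of the loop state
def pvAFin (st : (List String × List String) × String × List Char) : List String × List String :=
  if st.2.2.length > 0 then (st.1.1 ++ [String.ofList st.2.2], st.1.2 ++ [st.2.1]) else st.1

-- the maximal runs of equal tag-suffix, with an open run (t, p) in progress
def pvGroupsFrom (t : String) (p : List Char) (l : List (Char × String)) :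
    List (List Char × String) :=
  match l with
  | [] => [(p, t)]
  | (c, s) :: rs =>
    if pvTagSuffix s = t then pvGroupsFrom t (p ++ [c]) rs
    else (p, t) :: pvGroupsFrom (pvTagSuffix s) [c] rs

-- the runs of a (possibly empty) remainder list
def pvGroupsRest (l : List (Char × String)) : List (List Char × String) :=
  match l with
  | [] => []
  | (c, s) :: rs => pvGroupsFrom (pvTagSuffix s) [c] rs

theorem pvGroupsFrom_eq (l : List (Char × String)) :
    ∀ (t : String) (p : List Char),
    pvGroupsFrom t p l =
      (p ++ (l.takeWhile (fun q => pvTagSuffix q.2 == t)).map Prod.fst, t) ::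
        pvGroupsRest (l.dropWhile (fun q => pvTagSuffix q.2 == t)) := by
  induction l with
  | nil => intro t p; simp [pvGroupsFrom, pvGroupsRest]
  | cons hd rs ih =>
    intro t p
    obtain ⟨c, s⟩ := hd
    by_cases h : pvTagSuffix s = t
    · rw [pvGroupsFrom, if_pos h, ih]
      simp [h]
    · rw [pvGroupsFrom, if_neg h]
      simp [h, pvGroupsRest]

-- A's first pass (fold + flush) computes exactly the runs, appended to the accumulator
theorem pvA_phase1 (l : List (Char × String)) :
    ∀ (P T : List String) (t : String) (p : List Char), p ≠ [] →
    pvAFin (l.foldl pvAStep ((P, T), t, p)) =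
    (P ++ (pvGroupsFrom t p l).map (fun g => String.ofList g.1),
     T ++ (pvGroupsFrom t p l).map (fun g => g.2)) := by
  induction l with
  | nil =>
    intro P T t p hp
    simp [pvAFin, pvGroupsFrom, List.length_pos_iff, hp]
  | cons hd rs ih =>
    intro P T t p hp
    obtain ⟨c, s⟩ := hd
    by_cases h : pvTagSuffix s = t
    · rw [List.foldl_cons,
        show pvAStep ((P, T), t, p) (c, s) = ((P, T), t, p ++ [c]) from by
          simp [pvAStep, h],
        ih P T t (p ++ [c]) (by simp), pvGroupsFrom, if_pos h]
    · rw [List.foldl_cons,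
        show pvAStep ((P, T), t, p) (c, s) =
            ((P ++ [String.ofList p], T ++ [t]), pvTagSuffix s, [c]) from by
          simp [pvAStep, h, List.length_pos_iff, hp],
        ih _ _ _ [c] (by simp), pvGroupsFrom, if_neg h]
      simp [List.append_assoc]

-- B's fused loop = fold of A's emit step over the runs (fuel induction on the length)
theorem pvB_emit (n : Nat) : ∀ (rest : List (Char × String)), rest.length ≤ n →
    ∀ (c : Char) (s : String) (words tags : List String),
    pvBGo ((c, s) :: rest) words tags =
    ((pvGroupsFrom (pvTagSuffix s) [c] rest).map (fun g => (String.ofList g.1, g.2))).foldl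
      pvAEmit (words, tags) := by
  induction n with
  | zero =>
    intro rest hlen c s words tags
    rw [List.length_eq_zero_iff.mp (Nat.le_zero.mp hlen)]
    simp only [pvBGo, List.takeWhile_nil, List.dropWhile_nil, List.map_nil, List.map_cons,
      pvGroupsFrom, List.foldl_cons, List.foldl_nil, pvAEmit]
  | succ n ih =>
    intro rest hlen c s words tags
    rw [pvBGo, pvGroupsFrom_eq, List.map_cons, List.foldl_cons]
    have hemit : pvAEmit (words, tags)
        (String.ofList ([c] ++ (rest.takeWhile
            (fun q => pvTagSuffix q.2 == pvTagSuffix s)).map Prod.fst), pvTagSuffix s) =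
        (words ++ PySem.Str.split₀ (PySem.Str.strip (String.ofList (c :: (rest.takeWhile
            (fun q => pvTagSuffix q.2 == pvTagSuffix s)).map Prod.fst))),
         if pvTagSuffix s = "O" then
           tags ++ List.replicate (PySem.Str.split₀ (PySem.Str.strip (String.ofList (c ::
             (rest.takeWhile (fun q => pvTagSuffix q.2 == pvTagSuffix s)).map Prod.fst)))).length "O"
         else tags ++ ["B-" ++ pvTagSuffix s] ++
           List.replicate ((PySem.Str.split₀ (PySem.Str.strip (String.ofList (c ::
             (rest.takeWhile (fun q => pvTagSuffix q.2 == pvTagSuffix s)).map Prod.fst)))).length - 1)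
             ("I-" ++ pvTagSuffix s)) := by
      simp only [pvAEmit, List.singleton_append]
    rw [hemit]
    cases hr : rest.dropWhile (fun q => pvTagSuffix q.2 == pvTagSuffix s) with
    | nil => simp only [pvGroupsRest, List.map_nil, List.foldl_nil, pvBGo]
    | cons hd rs =>
      obtain ⟨c', s'⟩ := hd
      have hlen' : rs.length ≤ n := by
        have h1 := List.length_dropWhile_le (fun q => pvTagSuffix q.2 == pvTagSuffix s) rest
        rw [hr] at h1
        simp only [List.length_cons] at h1
        omega
      simp only [pvGroupsRest]
      exact ih rs hlen' c' s' _ _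

-- the first element of the pair list determines the initial run uniformly
theorem pvAStep_init (c : Char) (s : String) :
    pvAStep (([], []), "O", []) (c, s) = (([], []), pvTagSuffix s, [c]) := by
  by_cases h : pvTagSuffix s = "O" <;> simp [pvAStep, h]

-- ===== VERDICT (by name: the statement is the Claim_ definition above) =====
theorem extract_word_tag_spec : Claim_equal_extract_word_tag := by
  intro txt txt_tag _
  unfold Spec_extract_word_tag extract_word_tag extract_word_tag_alt
  cases hz : txt.toList.zip txt_tag with
  | nil =>
    rw [show pvBGo [] [] [] = ([], []) from by rw [pvBGo]]
    rfl
  | cons hd rest =>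
    obtain ⟨c, s⟩ := hd
    have hfin : (let st := ((c, s) :: rest).foldl pvAStep (([], []), "O", [])
        let (acc, cur, phrase) := st
        if phrase.length > 0 then (acc.1 ++ [String.ofList phrase], acc.2 ++ [cur]) else acc) =
        pvAFin (((c, s) :: rest).foldl pvAStep (([], []), "O", [])) := rfl
    simp only [hfin]
    rw [List.foldl_cons, pvAStep_init, pvA_phase1 rest [] [] (pvTagSuffix s) [c] (by simp)]
    simp only [List.nil_append]
    rw [List.zip_map']
    rw [pvB_emit rest.length rest le_rfl c s [] []]
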